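-- pv_equiv track=rewrite | github.com/8harath/PNT-REP | parking_detector.py | cluster_coordinates
-- ===== SOURCE A (Python) =====
-- def cluster_coordinates(coords, threshold):
--     """Cluster 1D coordinates based on proximity"""
--     if not coords:
--         return []
--
--     # Sort coordinates
--     sorted_coords = sorted(coords)
--
--     # Initial cluster with the first coordinate
--     clusters = [[sorted_coords[0]]]
--
--     # Cluster remaining coordinates
--     for coord in sorted_coords[1:]:
--         # Check if the coordinate is close to the last cluster
--         if coord - clusters[-1][-1] <= threshold:
--             # Add to the last cluster
--             clusters[-1].append(coord)
--         else:
--             # Start a new cluster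
--             clusters.append([coord])
--
--     # Calculate the mean of each cluster
--     cluster_means = [sum(cluster) // len(cluster) for cluster in clusters]
--
--     return cluster_means
-- ===== SOURCE B (Python) =====
-- def cluster_coordinates(coords, threshold):
--     """Cluster 1D coordinates by proximity; single pass keeping only a running
--     sum/count per cluster instead of materialising the cluster lists."""
--     s = sorted(coords)
--     if not s:
--         return []
--     means = []
--     total, count, prev = s[0], 1, s[0]
--     for y in s[1:]:
--         if y - prev > threshold:
--             means.append(total // count)
--             total, count = y, 1
--         else:
--             total += y
--             count += 1
--         prev = y
--     means.append(total // count)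
--     return means
-- ===== Notes on version B (the rewrite author's own statement) =====
-- stated objective: alternative
-- what changed: B never builds the list of cluster lists: one fold over the sorted coords keeps only a running sum/count (emitting a mean at each gap > threshold), replacing A's grow-the-nested-lists loop plus a second summing pass.
import Mathlib
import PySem

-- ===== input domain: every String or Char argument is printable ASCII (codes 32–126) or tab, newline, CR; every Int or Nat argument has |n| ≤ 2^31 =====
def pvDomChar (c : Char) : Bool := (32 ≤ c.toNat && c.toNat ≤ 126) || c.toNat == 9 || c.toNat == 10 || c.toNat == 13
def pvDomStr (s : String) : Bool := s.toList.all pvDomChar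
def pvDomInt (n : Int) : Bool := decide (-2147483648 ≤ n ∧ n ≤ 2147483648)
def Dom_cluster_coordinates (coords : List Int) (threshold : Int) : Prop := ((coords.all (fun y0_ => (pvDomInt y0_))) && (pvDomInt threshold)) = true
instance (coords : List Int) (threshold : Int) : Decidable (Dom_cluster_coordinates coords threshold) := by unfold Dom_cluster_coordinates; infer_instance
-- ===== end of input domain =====

-- B replaces A's grow-the-nested-cluster-lists loop (plus a second averaging pass) by one
-- fold over the sorted coordinates that keeps only a running sum/count and emits a mean
-- at each gap > threshold; same return value, no nested lists (objective: alternative).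

-- ===== PORT A =====
-- one iteration of A's clustering loop: look at clusters[-1][-1], then either
-- append coord to the last cluster or start a new one ('none' cases are unreachable:
-- clusters and its clusters are always nonempty)
def stepA (threshold : Int) (clusters : List (List Int)) (coord : Int) : List (List Int) :=
  match PySem.List.pyGet? clusters (-1) with
  | none => clusters
  | some last =>
    match PySem.List.pyGet? last (-1) with
    | none => clusters
    | some le =>
      if coord - le ≤ threshold then clusters.dropLast ++ [last ++ [coord]]
      else clusters ++ [[coord]]

def cluster_coordinates (coords : List Int) (threshold : Int) : List Int :=
  if coords = [] then []
  else
    match PySem.List.sorted coords (fun x => x) false with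
    | [] => []   -- unreachable: sorted of a nonempty list is nonempty
    | x :: rest =>   -- x = sorted_coords[0], rest = sorted_coords[1:]
      (rest.foldl (stepA threshold) [[x]]).map
        (fun c => PySem.Int.floordiv c.sum (c.length : Int))

-- ===== PORT B =====
-- one iteration of B's loop over state (means, total, count, prev)
def stepB (threshold : Int) (st : List Int × Int × Int × Int) (y : Int) : List Int × Int × Int × Int :=
  match st with
  | (means, total, count, prev) =>
    if y - prev > threshold then (means ++ [PySem.Int.floordiv total count], y, 1, y)
    else (means, total + y, count + 1, y)

def cluster_coordinates_alt (coords : List Int) (threshold : Int) : List Int :=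
  match PySem.List.sorted coords (fun x => x) false with
  | [] => []
  | x :: rest =>
    match rest.foldl (stepB threshold) ([], x, 1, x) with
    | (means, total, count, _) => means ++ [PySem.Int.floordiv total count]

-- ===== PRECONDITION & SPEC =====
def Spec_cluster_coordinates (coords : List Int) (threshold : Int) (out : List Int) : Prop := out = cluster_coordinates_alt coords threshold
instance (coords : List Int) (threshold : Int) (out : List Int) : Decidable (Spec_cluster_coordinates coords threshold out) := by unfold Spec_cluster_coordinates; infer_instance

-- ===== CLAIM (what is proved, stated in full; the proofs are below) =====
def Claim_equal_cluster_coordinates : Prop := ∀ (coords : List Int) (threshold : Int), Dom_cluster_coordinates coords threshold → Spec_cluster_coordinates coords threshold (cluster_coordinates coords threshold)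

-- ===== LEMMAS AND PROOFS =====

-- common description of both loops: starting after an element `le`, split the remaining
-- sorted tail into (elements continuing the current cluster, the later clusters)
def chunksFrom (threshold : Int) (le : Int) : List Int → List Int × List (List Int)
  | [] => ([], [])
  | x :: xs =>
    let p := chunksFrom threshold x xs
    if x - le ≤ threshold then (x :: p.1, p.2)
    else ([], (x :: p.1) :: p.2)

theorem foldA_chunks (threshold : Int) (xs : List Int) :
    ∀ (init : List (List Int)) (c : List Int) (le : Int),
      xs.foldl (stepA threshold) (init ++ [c ++ [le]]) =
        init ++ ((c ++ le :: (chunksFrom threshold le xs).1) :: (chunksFrom threshold le xs).2) := by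
  induction xs with
  | nil => intro init c le; simp [chunksFrom]
  | cons x xs ih =>
    intro init c le
    simp only [List.foldl_cons, chunksFrom]
    have h1 : stepA threshold (init ++ [c ++ [le]]) x =
        if x - le ≤ threshold then init ++ [(c ++ [le]) ++ [x]]
        else (init ++ [c ++ [le]]) ++ [[x]] := by
      simp only [stepA, PySem.List.pyGet?_neg_one_append_singleton]
      split_ifs with h
      · simp
      · rfl
    rw [h1]
    by_cases h : x - le ≤ threshold
    · simp only [if_pos h]
      have := ih init (c ++ [le]) x
      rw [this]
      simp
    · simp only [if_neg h]
      have := ih (init ++ [c ++ [le]]) [] x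
      simp only [List.nil_append] at this
      rw [this]
      simp

theorem foldB_chunks (threshold : Int) (xs : List Int) :
    ∀ (means : List Int) (total count prev : Int),
      (xs.foldl (stepB threshold) (means, total, count, prev)).1 ++
        [PySem.Int.floordiv (xs.foldl (stepB threshold) (means, total, count, prev)).2.1
            (xs.foldl (stepB threshold) (means, total, count, prev)).2.2.1] =
        means ++ (PySem.Int.floordiv (total + (chunksFrom threshold prev xs).1.sum)
                    (count + ((chunksFrom threshold prev xs).1.length : Int)) ::
                  (chunksFrom threshold prev xs).2.map
                    (fun c => PySem.Int.floordiv c.sum (c.length : Int))) := by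
  induction xs with
  | nil => intro means total count prev; simp [chunksFrom]
  | cons x xs ih =>
    intro means total count prev
    simp only [List.foldl_cons, chunksFrom]
    by_cases h : x - prev ≤ threshold
    · have hnot : ¬ (x - prev > threshold) := by omega
      simp only [stepB, if_neg hnot, if_pos h]
      have := ih means (total + x) (count + 1) x
      rw [this]
      congr 2
      · congr 1 <;> (try simp only [List.sum_cons, List.length_cons, List.sum_nil, List.length_nil]) <;> (try push_cast) <;> ring
    · have hgt : x - prev > threshold := by omega
      simp only [stepB, if_pos hgt, if_neg h]
      have := ih (means ++ [PySem.Int.floordiv total count]) x 1 x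
      rw [this]
      simp only [List.map_cons, List.sum_cons, List.length_cons, List.append_assoc,
        List.cons_append, List.nil_append]
      congr 2
      · congr 1 <;> (try simp only [List.sum_cons, List.length_cons, List.sum_nil, List.length_nil]) <;> (try push_cast) <;> ring
      · congr 2
        · congr 1 <;> (try simp only [List.sum_cons, List.length_cons, List.sum_nil, List.length_nil]) <;> (try push_cast) <;> ring

-- ===== VERDICT (by name: the statement is the Claim_ definition above) =====
theorem cluster_coordinates_spec : Claim_equal_cluster_coordinates := by
  intro coords threshold _
  unfold Spec_cluster_coordinates cluster_coordinates cluster_coordinates_alt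
  by_cases hc : coords = []
  · subst hc; simp [PySem.List.sorted]
  · simp only [if_neg hc]
    cases hs : PySem.List.sorted coords (fun x => x) false with
    | nil => rfl
    | cons x rest =>
      dsimp only
      have hA := foldA_chunks threshold rest [] [] x
      simp only [List.nil_append] at hA
      rw [hA]
      have hB := foldB_chunks threshold rest [] x 1 x
      simp only [List.nil_append] at hB
      rw [hB]
      simp only [List.map_cons, List.sum_cons, List.length_cons, List.nil_append]
      congr 2
      · congr 1 <;> (try simp only [List.sum_cons, List.length_cons, List.sum_nil, List.length_nil]) <;> (try push_cast) <;> ring
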